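-- pv_equiv track=rewrite | github.com/FrankVolpe/Financial-Statement-Analysis-Toolkit | src/PullData.py | SortAvailableYears
-- ===== SOURCE A (Python) =====
-- def SortAvailableYears(CleanAvailability):
--     IS = list(CleanAvailability[0].keys())
--     CF = list(CleanAvailability[1].keys())
--     BS = list(CleanAvailability[2].keys())
--     Output = []
--     for x in IS:
--         for y in CF:
--             for z in BS:
--                 if x == y == z:
--                     Output.append(x)
--     Output.sort()
--     return Output
-- ===== SOURCE B (Python) =====
-- def SortAvailableYears(CleanAvailability):
--     common = set(CleanAvailability[0]) & set(CleanAvailability[1]) & set(CleanAvailability[2])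
--     return sorted(common)
-- ===== Notes on version B (the rewrite author's own statement) =====
-- stated objective: faster
-- what changed: Replaces the triple nested loop over the three key lists (cubic, with a final sort) by a direct set intersection of the three key sets followed by one sort.
import Mathlib
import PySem

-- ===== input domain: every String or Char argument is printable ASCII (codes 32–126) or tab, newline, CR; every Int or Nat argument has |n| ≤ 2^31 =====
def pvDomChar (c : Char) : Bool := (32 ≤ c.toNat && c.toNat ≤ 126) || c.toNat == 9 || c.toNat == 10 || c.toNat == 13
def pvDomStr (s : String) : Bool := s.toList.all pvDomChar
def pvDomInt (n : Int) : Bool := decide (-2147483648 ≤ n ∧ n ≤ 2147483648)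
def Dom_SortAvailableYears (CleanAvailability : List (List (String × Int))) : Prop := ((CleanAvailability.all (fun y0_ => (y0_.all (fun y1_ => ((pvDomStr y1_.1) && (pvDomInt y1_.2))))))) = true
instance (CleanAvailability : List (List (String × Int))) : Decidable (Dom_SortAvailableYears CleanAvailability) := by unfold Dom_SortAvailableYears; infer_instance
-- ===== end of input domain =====

-- B replaces A's triple nested loop by one set intersection plus a sort (asymptotically faster).

-- ===== PORT A =====
def SortAvailableYears (CleanAvailability : List (List (String × Int))) : List String :=
  let IS := (PySem.List.pyGetD CleanAvailability 0 []).map Prod.fst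
  let CF := (PySem.List.pyGetD CleanAvailability 1 []).map Prod.fst
  let BS := (PySem.List.pyGetD CleanAvailability 2 []).map Prod.fst
  let Output : List String :=
    IS.foldl (fun acc x =>
      CF.foldl (fun acc y =>
        BS.foldl (fun acc z =>
          if x == y && y == z then acc ++ [x] else acc) acc) acc) []
  PySem.List.sorted Output (fun s => s) false

-- ===== PORT B =====
def SortAvailableYears_alt (CleanAvailability : List (List (String × Int))) : List String :=
  let common : PySem.Set String :=
    PySem.Set.inter
      (PySem.Set.inter
        (PySem.Set.ofList ((PySem.List.pyGetD CleanAvailability 0 []).map Prod.fst))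
        ((PySem.List.pyGetD CleanAvailability 1 []).map Prod.fst))
      ((PySem.List.pyGetD CleanAvailability 2 []).map Prod.fst)
  PySem.List.sorted common (fun s => s) false

-- ===== PRECONDITION & SPEC =====
-- Pre_ excludes lists of fewer than three dicts, on which A raises IndexError; it also requires the
-- first three association lists to have distinct keys, since Python dicts always do.
def Pre_SortAvailableYears (CleanAvailability : List (List (String × Int))) : Prop :=
  3 ≤ CleanAvailability.length ∧
  ((PySem.List.pyGetD CleanAvailability 0 []).map Prod.fst).Nodup ∧
  ((PySem.List.pyGetD CleanAvailability 1 []).map Prod.fst).Nodup ∧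
  ((PySem.List.pyGetD CleanAvailability 2 []).map Prod.fst).Nodup
instance (CleanAvailability : List (List (String × Int))) : Decidable (Pre_SortAvailableYears CleanAvailability) := by unfold Pre_SortAvailableYears; infer_instance

def pvWitness_SortAvailableYears : (List (List (String × Int))) :=
  [[("2019", 1), ("2020", 2)], [("2020", 3)], [("2020", 4), ("2018", 5)]]

def Spec_SortAvailableYears (CleanAvailability : List (List (String × Int))) (out : List String) : Prop := out = SortAvailableYears_alt CleanAvailability
instance (CleanAvailability : List (List (String × Int))) (out : List String) : Decidable (Spec_SortAvailableYears CleanAvailability out) := by unfold Spec_SortAvailableYears; infer_instance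

-- ===== CLAIM (what is proved, stated in full; the proofs are below) =====
def Claim_equal_SortAvailableYears : Prop := ∀ (CleanAvailability : List (List (String × Int))), Dom_SortAvailableYears CleanAvailability → Pre_SortAvailableYears CleanAvailability → Spec_SortAvailableYears CleanAvailability (SortAvailableYears CleanAvailability)

-- ===== LEMMAS AND PROOFS =====

-- On a Nodup list, filtering for equality with x yields [x] or [].
theorem pv_filter_eq_single (x : String) (l : List String) (h : l.Nodup) :
    l.filter (fun z => x == z) = if l.contains x then [x] else [] := by
  induction l with
  | nil => simp
  | cons a t ih =>
    rcases List.nodup_cons.mp h with ⟨ha, ht⟩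
    by_cases hx : x = a
    · subst hx
      have : t.filter (fun z => x == z) = [] := by
        apply List.filter_eq_nil_iff.mpr
        intro z hz
        simp only [beq_iff_eq]
        exact fun he => ha (he ▸ hz)
      simp [this]
    · simp [ih ht, hx]

-- The two inner loops of A, flattened: given distinct keys, each x contributes
-- [x] if it is in both CF and BS, else nothing.
theorem pv_inner (x : String) (CF BS : List String) (hCF : CF.Nodup) (hBS : BS.Nodup) :
    CF.flatMap (fun y => (BS.filter (fun z => x == y && y == z)).map (fun _ => x)) =
      if CF.contains x && BS.contains x then [x] else [] := by
  induction CF with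
  | nil => simp
  | cons y t ih =>
    rcases List.nodup_cons.mp hCF with ⟨hy, ht⟩
    rw [List.flatMap_cons, ih ht]
    by_cases hx : x = y
    · subst hx
      have h1 : (BS.filter (fun z => x == x && x == z)) = BS.filter (fun z => x == z) := by
        simp
      have h2 : t.contains x = false := by
        simp only [List.contains_eq_mem, decide_eq_false_iff_not]
        exact hy
      rw [h1, pv_filter_eq_single x BS hBS, h2]
      by_cases hb : x ∈ BS <;> simp [hb]
    · have h1 : (BS.filter (fun z => x == y && y == z)) = [] := by
        apply List.filter_eq_nil_iff.mpr
        intro z _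
        simp [hx]
      rw [h1]
      simp [hx]

theorem pv_flatMap_ite_filter (l : List String) (p : String → Bool) :
    l.flatMap (fun x => if p x then [x] else []) = l.filter p := by
  induction l with
  | nil => rfl
  | cons a t ih =>
    by_cases h : p a <;> simp [List.flatMap_cons, ih, h]

-- ===== VERDICT (by name: the statement is the Claim_ definition above) =====
theorem SortAvailableYears_spec : Claim_equal_SortAvailableYears := by
  intro CA _ hpre
  obtain ⟨_, h0, h1, h2⟩ := hpre
  unfold Spec_SortAvailableYears SortAvailableYears SortAvailableYears_alt
  set IS := (PySem.List.pyGetD CA 0 []).map Prod.fst with hIS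
  set CF := (PySem.List.pyGetD CA 1 []).map Prod.fst with hCF
  set BS := (PySem.List.pyGetD CA 2 []).map Prod.fst with hBS
  simp only [PySem.List.foldl_append_if, PySem.List.foldl_append_eq_flatMap,
    List.nil_append]
  have key : IS.flatMap (fun x => CF.flatMap (fun y =>
      (BS.filter (fun z => x == y && y == z)).map (fun _ => x))) =
      IS.filter (fun x => CF.contains x && BS.contains x) := by
    rw [← pv_flatMap_ite_filter IS (fun x => CF.contains x && BS.contains x)]
    apply List.flatMap_congr
    intro x _
    exact pv_inner x CF BS h1 h2
  rw [key]
  congr 1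
  simp only [PySem.Set.inter, PySem.Set.ofList_eq_self_of_nodup IS h0, List.filter_filter,
    PySem.Set.contains_eq_listContains]
  apply List.filter_congr
  intro x _
  simp [Bool.and_comm]
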